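-- pv_equiv track=rewrite | github.com/valmir-filho/python | codewars/files-200-to-299/challenge261.py | encrypt_this
-- ===== SOURCE A (Python) =====
-- def encrypt_this(text):
--     # Split the text into words.
--     words = text.split()
--     encrypted_words = []
--
--     for word in words:
--         # Convert the first letter to its ASCII code.
--         ascii_code = str(ord(word[0]))
--
--         if len(word) == 1:
--             # If the word has only one letter, use only the ASCII code.
--             encrypted_word = ascii_code
--         elif len(word) == 2:
--             # If the word has two letters, just add the second letter.
--             encrypted_word = ascii_code + word[1]
--         else:
--             # For words with more than two letters, swap the second and last letters.
--             encrypted_word = ascii_code + word[-1] + word[2:-1] + word[1]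
--
--         # Append the encrypted word to the list.
--         encrypted_words.append(encrypted_word)
--
--     # Join the encrypted words with spaces and return.
--     return ' '.join(encrypted_words)
-- ===== SOURCE B (Python) =====
-- def encrypt_this(text):
--     # Permutation-map construction: instead of branching on word length and
--     # concatenating slices, each output position i >= 1 pulls its character from a
--     # source index given by the swap permutation (1 <-> n-1, identity elsewhere).
--     def src(i, n):
--         if i == 1:
--             return n - 1
--         if i == n - 1:
--             return 1
--         return i
--     return ' '.join(
--         str(ord(w[0])) + ''.join(w[src(i, len(w))] for i in range(1, len(w)))
--         for w in text.split())
-- ===== Notes on version B (the rewrite author's own statement) =====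
-- stated objective: alternative
-- what changed: Builds each encrypted word by a permutation map (output position i reads the input at index sigma(i) where sigma swaps 1 and n-1) in one comprehension over positions, instead of A's three-way length branching with slice concatenation.
import Mathlib
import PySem

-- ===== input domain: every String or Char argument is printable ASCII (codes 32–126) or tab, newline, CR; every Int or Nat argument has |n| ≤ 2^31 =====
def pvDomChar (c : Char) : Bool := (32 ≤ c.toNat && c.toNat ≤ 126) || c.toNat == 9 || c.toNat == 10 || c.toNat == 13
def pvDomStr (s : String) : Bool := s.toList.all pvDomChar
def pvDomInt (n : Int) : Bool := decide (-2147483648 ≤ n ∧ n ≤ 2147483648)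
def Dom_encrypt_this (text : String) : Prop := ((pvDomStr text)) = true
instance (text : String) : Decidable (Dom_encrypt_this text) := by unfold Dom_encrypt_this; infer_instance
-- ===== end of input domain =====

-- B builds each encrypted word by a permutation map over output positions (sigma swaps 1 and
-- n-1) instead of A's three-way length branching with slice concatenation; alternative, same cost.
-- A is total (split() words are nonempty, so word[0] never raises).

-- ===== PORT A =====
-- per-word body of A's loop; the [] branch is unreachable on split₀ output (split() words are nonempty)
def encryptWordA (word : String) : String :=
  match word.toList with
  | [] => ""
  | c :: _ =>
    let w := word.toList
    let ascii := PySem.Int.toChars ((c.toNat : Int))    -- str(ord(word[0]))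
    String.ofList (
      if PySem.Chars.len w = 1 then ascii
      else if PySem.Chars.len w = 2 then ascii ++ [PySem.List.pyGetD w 1 ' ']
      else ascii ++ [PySem.List.pyGetD w (-1) ' '] ++ PySem.List.slice w (some 2) (some (-1))
             ++ [PySem.List.pyGetD w 1 ' '])

def encrypt_this (text : String) : String :=
  PySem.Str.join " " ((PySem.Str.split₀ text).map encryptWordA)

-- ===== PORT B =====
-- src(i, n): the source index for output position i (swap 1 <-> n-1, identity elsewhere)
def srcIdx (i n : Int) : Int := if i = 1 then n - 1 else if i = n - 1 then 1 else i

-- per-word body of B's comprehension: str(ord(w[0])) + ''.join(w[src(i,len(w))] for i in range(1,len(w)))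
def encryptWordB (word : String) : String :=
  match word.toList with
  | [] => ""
  | c :: _ =>
    let w := word.toList
    let n : Int := PySem.Chars.len w
    String.ofList (PySem.Int.toChars ((c.toNat : Int)) ++
      (PySem.List.pyRange 1 n 1).map (fun i => PySem.List.pyGetD w (srcIdx i n) ' '))

def encrypt_this_alt (text : String) : String :=
  PySem.Str.join " " ((PySem.Str.split₀ text).map encryptWordB)

-- ===== PRECONDITION & SPEC =====
def Spec_encrypt_this (text : String) (out : String) : Prop := out = encrypt_this_alt text
instance (text : String) (out : String) : Decidable (Spec_encrypt_this text out) := by unfold Spec_encrypt_this; infer_instance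

-- ===== CLAIM (what is proved, stated in full; the proofs are below) =====
def Claim_equal_encrypt_this : Prop := ∀ (text : String), Dom_encrypt_this text → Spec_encrypt_this text (encrypt_this text)

-- ===== LEMMAS AND PROOFS =====

theorem encryptWord_eq (word : String) : encryptWordA word = encryptWordB word := by
  unfold encryptWordA encryptWordB
  rcases hw : word.toList with _ | ⟨c, rest⟩
  · rfl
  · rcases rest with _ | ⟨d, rest2⟩
    · -- length 1
      simp [PySem.Chars.len, PySem.List.pyRange_one_eq_nil]
    · rcases List.eq_nil_or_concat' rest2 with h2 | ⟨mid, e, h2⟩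
      · -- length 2
        subst h2
        simp [PySem.Chars.len, srcIdx, show PySem.List.pyRange 1 2 1 = [1] from by decide,
          PySem.List.pyGetD, PySem.List.pyGet?, PySem.List.pyIdx?]
      · -- length ≥ 3
        subst h2
        have hlen : PySem.Chars.len (c :: d :: (mid ++ [e])) = ((mid.length : Int) + 3) := by
          simp [PySem.Chars.len]; ring
        simp only [hlen]
        set n : Int := ((mid.length : Int) + 3) with hndef
        have hn3 : (3 : Int) ≤ n := by omega
        rw [if_neg (by omega), if_neg (by omega)]
        -- compute the key lookups
        have hg1 : PySem.List.pyGetD (c :: d :: (mid ++ [e])) 1 ' ' = d := by simp [pysem]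
        have hge : PySem.List.pyGetD (c :: d :: (mid ++ [e])) (n - 1) ' ' = e := by
          rw [show n - 1 = ((mid.length + 2 : Nat) : Int) from by push_cast; omega,
            PySem.List.pyGetD_natCast]
          simp [List.getD]
        have hgm1 : PySem.List.pyGetD (c :: d :: (mid ++ [e])) (-1) ' ' = e :=
          PySem.List.pyGetD_neg_one_append_singleton (c :: d :: mid) e ' '
        -- B side: split range(1, n) as [1] ++ range(2, n-1) ++ [n-1]
        have hsplit : PySem.List.pyRange 1 n 1
            = 1 :: (PySem.List.pyRange 2 (n - 1) 1 ++ [n - 1]) := by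
          rw [PySem.List.pyRange_one_cons (by omega)]
          congr 1
          rw [show n = (n - 1) + 1 by ring, PySem.List.pyRange_one_succ_right (by omega)]
          ring_nf
        -- the middle of the map is mid: compare with the map over range(2, n)
        have hfull : (PySem.List.pyRange 2 n 1).map
              (fun i => PySem.List.pyGetD (c :: d :: (mid ++ [e])) i ' ')
            = mid ++ [e] := by
          have h := PySem.List.map_pyGetD_pyRange (xs := c :: d :: (mid ++ [e]))
            (a := 2) (d := ' ') (by omega)
          rw [show PySem.List.len (c :: d :: (mid ++ [e])) = n from by
            simp [PySem.List.len]; ring] at h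
          simpa using h
        have hmidsplit : PySem.List.pyRange 2 n 1
            = PySem.List.pyRange 2 (n - 1) 1 ++ [n - 1] := by
          rw [show n = (n - 1) + 1 by ring, PySem.List.pyRange_one_succ_right (by omega)]
          ring_nf
        have hmid : (PySem.List.pyRange 2 (n - 1) 1).map
              (fun i => PySem.List.pyGetD (c :: d :: (mid ++ [e])) i ' ')
            = mid := by
          rw [hmidsplit] at hfull
          simp only [List.map_append, List.map_cons, List.map_nil, hge] at hfull
          have hlenmap : ((PySem.List.pyRange 2 (n - 1) 1).map
              (fun i => PySem.List.pyGetD (c :: d :: (mid ++ [e])) i ' ')).length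
              = mid.length := by
            simp [PySem.List.length_pyRange_one]; omega
          exact List.append_inj_left hfull hlenmap
        -- srcIdx is the identity on the middle range
        have hcongr : (PySem.List.pyRange 2 (n - 1) 1).map
              (fun i => PySem.List.pyGetD (c :: d :: (mid ++ [e])) (srcIdx i n) ' ')
            = (PySem.List.pyRange 2 (n - 1) 1).map
              (fun i => PySem.List.pyGetD (c :: d :: (mid ++ [e])) i ' ') := by
          apply List.map_congr_left
          intro i hi
          rw [PySem.List.mem_pyRange_one] at hi
          simp [srcIdx, show ¬ i = 1 from by omega, show ¬ i = n - 1 from by omega]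
        rw [hsplit]
        simp only [List.map_cons, List.map_append, List.map_nil, hcongr, hmid]
        rw [show srcIdx 1 n = n - 1 from by simp [srcIdx],
          show srcIdx (n - 1) n = 1 from by simp [srcIdx, show ¬ (n - 1 = 1) from by omega]]
        rw [hge, hg1, hgm1]
        -- A's middle slice is mid
        have hsliceA : PySem.List.slice (c :: d :: (mid ++ [e])) (some 2) (some (-1)) = mid := by
          simp [PySem.List.slice, PySem.List.clampIdx]
          rw [if_neg (by omega), show ((mid.length : Int) + 1 + 1).toNat - 2 = mid.length from by omega]
          exact List.take_left
        rw [hsliceA]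
        simp

-- ===== VERDICT (by name: the statement is the Claim_ definition above) =====
theorem encrypt_this_spec : Claim_equal_encrypt_this := by
  intro text _
  unfold Spec_encrypt_this encrypt_this encrypt_this_alt
  simp [funext encryptWord_eq]
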